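-- pv_equiv track=rewrite | github.com/stenknutsen/HomeGrownPOSTagger | PhaseFourTagging.py | DT_UNK_PUNC_N_Tagger
-- ===== SOURCE A (Python) =====
-- def DT_UNK_PUNC_N_Tagger(sent):
--     sentToReturn = []
--     skip = 0
--
--     for i in range(len(sent)):
--
--         if skip>0:
--             skip = skip -1
--             continue
--
--
--         if (i)<0 | (i+3)>=len(sent):
--             sentToReturn += [sent[i]]
--             continue
--
--         leftContext = sent[i]
--         leftTarget = sent[i+1]
--         rightTarget = sent[i+2]
--         rightContext = sent[i+3]
--
--
--         if (leftContext[1]=="DT")&(leftTarget[1]=="UNK")&(rightTarget[1]==",")&(rightContext[1].startswith("N")):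
--
--             sentToReturn += [leftContext]
--             sentToReturn += [(leftTarget[0], "N")]
--             sentToReturn += [rightTarget]
--             sentToReturn += [rightContext]
--             skip = 3
--
--         else:
--             sentToReturn += [leftContext]
--
--     return sentToReturn
-- ===== SOURCE B (Python) =====
-- def DT_UNK_PUNC_N_Tagger(sent):
--     result = list(sent)
--     for i in range(len(sent) - 3):
--         if sent[i][1] == "DT" and sent[i+1][1] == "UNK" and sent[i+2][1] == "," and sent[i+3][1].startswith("N"):
--             result[i+1] = (sent[i+1][0], "N")
--     return result
-- ===== Notes on version B (the rewrite author's own statement) =====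
-- stated objective: simpler
-- what changed: Replaces A's emit-and-skip state machine (output accumulator plus skip counter) with a shallow copy retagged in place at each match position, relying on the fact that matches cannot overlap.
import Mathlib
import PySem

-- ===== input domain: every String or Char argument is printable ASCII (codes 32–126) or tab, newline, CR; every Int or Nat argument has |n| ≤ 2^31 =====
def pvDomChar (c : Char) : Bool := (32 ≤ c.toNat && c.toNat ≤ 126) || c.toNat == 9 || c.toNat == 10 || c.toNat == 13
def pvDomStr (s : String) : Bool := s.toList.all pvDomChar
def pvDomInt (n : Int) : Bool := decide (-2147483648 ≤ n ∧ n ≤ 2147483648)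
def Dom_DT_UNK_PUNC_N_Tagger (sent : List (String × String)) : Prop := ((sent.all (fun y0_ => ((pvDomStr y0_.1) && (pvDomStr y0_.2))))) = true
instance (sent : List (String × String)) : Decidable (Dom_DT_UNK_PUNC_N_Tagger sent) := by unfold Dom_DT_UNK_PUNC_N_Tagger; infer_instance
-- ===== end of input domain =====

-- B replaces A's emit-and-skip state machine with a shallow copy retagged in place (matches cannot overlap); objective: simpler.

-- ===== PORT A =====
-- Python A: loop over range(len(sent)) carrying (sentToReturn, skip).
-- Note: A's guard `(i)<0 | (i+3)>=len(sent)` parses (| binds tighter than comparison)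
-- as the chained comparison `i < (i+3) >= len(sent)`, i.e. exactly `i+3 >= len(sent)`;
-- the port writes that value.  The indexing sent[i..i+3] is always in range where it
-- is reached, ported as getD with a dummy default.
def DT_UNK_PUNC_N_Tagger (sent : List (String × String)) : List (String × String) :=
  ((List.range sent.length).foldl (fun (st : List (String × String) × Nat) i =>
      if st.2 > 0 then (st.1, st.2 - 1)
      else if sent.length ≤ i + 3 then (st.1 ++ [sent.getD i ("", "")], st.2)
      else
        let leftContext := sent.getD i ("", "")
        let leftTarget := sent.getD (i+1) ("", "")
        let rightTarget := sent.getD (i+2) ("", "")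
        let rightContext := sent.getD (i+3) ("", "")
        if (leftContext.2 == "DT") && (leftTarget.2 == "UNK") && (rightTarget.2 == ",")
            && PySem.Str.startswith rightContext.2 "N" then
          (st.1 ++ [leftContext] ++ [(leftTarget.1, "N")] ++ [rightTarget] ++ [rightContext], 3)
        else (st.1 ++ [leftContext], st.2))
    (([] : List (String × String)), (0 : Nat))).1

-- ===== PORT B =====
-- Python B: result = list(sent); for i in range(len(sent)-3): on a match set result[i+1].
def DT_UNK_PUNC_N_Tagger_alt (sent : List (String × String)) : List (String × String) :=
  (List.range (sent.length - 3)).foldl (fun result i =>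
      if ((sent.getD i ("", "")).2 == "DT") && ((sent.getD (i+1) ("", "")).2 == "UNK")
          && ((sent.getD (i+2) ("", "")).2 == ",")
          && PySem.Str.startswith (sent.getD (i+3) ("", "")).2 "N" then
        result.set (i+1) ((sent.getD (i+1) ("", "")).1, "N")
      else result)
    sent

-- ===== PRECONDITION & SPEC =====
def Spec_DT_UNK_PUNC_N_Tagger (sent : List (String × String)) (out : List (String × String)) : Prop := out = DT_UNK_PUNC_N_Tagger_alt sent
instance (sent : List (String × String)) (out : List (String × String)) : Decidable (Spec_DT_UNK_PUNC_N_Tagger sent out) := by unfold Spec_DT_UNK_PUNC_N_Tagger; infer_instance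

-- ===== CLAIM (what is proved, stated in full; the proofs are below) =====
def Claim_equal_DT_UNK_PUNC_N_Tagger : Prop := ∀ (sent : List (String × String)), Dom_DT_UNK_PUNC_N_Tagger sent → Spec_DT_UNK_PUNC_N_Tagger sent (DT_UNK_PUNC_N_Tagger sent)

-- ===== LEMMAS AND PROOFS =====

-- the shared pattern condition at window start i (without the bound check)
def pvCond (sent : List (String × String)) (i : Nat) : Bool :=
  ((sent.getD i ("", "")).2 == "DT") && ((sent.getD (i+1) ("", "")).2 == "UNK")
  && ((sent.getD (i+2) ("", "")).2 == ",")
  && PySem.Str.startswith (sent.getD (i+3) ("", "")).2 "N"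

-- bounded match
def pvMatch (sent : List (String × String)) (i : Nat) : Bool :=
  decide (i + 3 < sent.length) && pvCond sent i

-- the common output at position j
def pvOut (sent : List (String × String)) (j : Nat) : String × String :=
  if 1 ≤ j ∧ pvMatch sent (j-1) = true then ((sent.getD j ("", "")).1, "N")
  else sent.getD j ("", "")

-- proof-side copies of the two loop bodies
def pvStepA (sent : List (String × String)) (st : List (String × String) × Nat) (i : Nat) :
    List (String × String) × Nat :=
  if st.2 > 0 then (st.1, st.2 - 1)
  else if sent.length ≤ i + 3 then (st.1 ++ [sent.getD i ("", "")], st.2)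
  else if pvCond sent i = true then
    (st.1 ++ [sent.getD i ("", "")] ++ [((sent.getD (i+1) ("", "")).1, "N")]
        ++ [sent.getD (i+2) ("", "")] ++ [sent.getD (i+3) ("", "")], 3)
  else (st.1 ++ [sent.getD i ("", "")], st.2)

def pvStepB (sent : List (String × String)) (result : List (String × String)) (i : Nat) :
    List (String × String) :=
  if pvCond sent i = true then result.set (i+1) ((sent.getD (i+1) ("", "")).1, "N") else result

theorem pvA_def (sent : List (String × String)) :
    DT_UNK_PUNC_N_Tagger sent = ((List.range sent.length).foldl (pvStepA sent) ([], 0)).1 := rfl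

theorem pvB_def (sent : List (String × String)) :
    DT_UNK_PUNC_N_Tagger_alt sent = (List.range (sent.length - 3)).foldl (pvStepB sent) sent := rfl

theorem pvMatch_DT (sent : List (String × String)) (t : Nat) (h : pvMatch sent t = true) :
    (sent.getD t ("", "")).2 = "DT" := by
  simp only [pvMatch, pvCond, Bool.and_eq_true, beq_iff_eq, decide_eq_true_eq] at h
  exact h.2.1.1.1

theorem pvMatch_no_overlap (sent : List (String × String)) (i : Nat)
    (h : pvMatch sent i = true) :
    pvMatch sent (i+1) = false ∧ pvMatch sent (i+2) = false ∧ pvMatch sent (i+3) = false := by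
  have h' := h
  simp only [pvMatch, pvCond, Bool.and_eq_true, beq_iff_eq, decide_eq_true_eq] at h'
  obtain ⟨-, ⟨⟨-, hunk⟩, hcm⟩, hN⟩ := h'
  refine ⟨?_, ?_, ?_⟩
  · cases hx : pvMatch sent (i+1) with
    | false => rfl
    | true => exact absurd (pvMatch_DT sent _ hx) (by rw [hunk]; decide)
  · cases hx : pvMatch sent (i+2) with
    | false => rfl
    | true => exact absurd (pvMatch_DT sent _ hx) (by rw [hcm]; decide)
  · cases hx : pvMatch sent (i+3) with
    | false => rfl
    | true =>
      rw [pvMatch_DT sent _ hx] at hN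
      exact absurd hN (by decide)

theorem pvStepB_length (sent : List (String × String)) (r : List (String × String)) (i : Nat) :
    (pvStepB sent r i).length = r.length := by
  unfold pvStepB; split <;> simp

theorem pvFoldB_length (sent : List (String × String)) :
    ∀ (l : List Nat) (r : List (String × String)),
      (l.foldl (pvStepB sent) r).length = r.length := by
  intro l
  induction l with
  | nil => intro r; rfl
  | cons i l ih =>
    intro r
    rw [List.foldl_cons, ih, pvStepB_length]

theorem pvFoldB_getD (sent : List (String × String)) :
    ∀ (l : List Nat) (r : List (String × String)), r.length = sent.length →
      (∀ i ∈ l, i + 1 < sent.length) → ∀ j : Nat,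
      (l.foldl (pvStepB sent) r).getD j ("", "") =
        if 1 ≤ j ∧ (j-1) ∈ l ∧ pvCond sent (j-1) = true then ((sent.getD j ("", "")).1, "N")
        else r.getD j ("", "") := by
  intro l
  induction l with
  | nil => intro r _ _ j; simp
  | cons i l ih =>
    intro r hr hl j
    rw [List.foldl_cons,
      ih (pvStepB sent r i) (by rw [pvStepB_length]; exact hr)
        (fun t ht => hl t (List.mem_cons_of_mem _ ht)) j]
    by_cases hA : 1 ≤ j ∧ (j-1) ∈ l ∧ pvCond sent (j-1) = true
    · rw [if_pos hA, if_pos ⟨hA.1, List.mem_cons_of_mem _ hA.2.1, hA.2.2⟩]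
    · rw [if_neg hA]
      by_cases hB : j = i + 1 ∧ pvCond sent i = true
      · obtain ⟨rfl, hCi⟩ := hB
        rw [if_pos ⟨by omega, List.mem_cons_self, hCi⟩]
        unfold pvStepB
        rw [if_pos hCi, List.getD_eq_getElem?_getD, List.getElem?_set]
        have hlt : i + 1 < r.length := by rw [hr]; exact hl i List.mem_cons_self
        simp [hlt]
      · have hRHS : ¬ (1 ≤ j ∧ (j-1) ∈ i :: l ∧ pvCond sent (j-1) = true) := by
          rintro ⟨h1, hm, hC⟩
          rcases List.mem_cons.1 hm with hji | hml
          · exact hB ⟨by omega, by rw [show i = j - 1 from hji.symm]; exact hC⟩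
          · exact hA ⟨h1, hml, hC⟩
        rw [if_neg hRHS]
        unfold pvStepB
        split
        · next hCi =>
          have hne : ¬ (i + 1 = j) := fun e => hB ⟨e.symm, hCi⟩
          rw [List.getD_eq_getElem?_getD, List.getElem?_set, if_neg hne,
            ← List.getD_eq_getElem?_getD]
        · rfl

theorem B_eq_map (sent : List (String × String)) :
    DT_UNK_PUNC_N_Tagger_alt sent = (List.range sent.length).map (pvOut sent) := by
  rw [pvB_def]
  apply List.ext_getElem
  · rw [pvFoldB_length]; simp
  · intro j h1 h2
    rw [← List.getD_eq_getElem _ ("", "") h1,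
      pvFoldB_getD sent _ sent rfl (fun t ht => by rw [List.mem_range] at ht; omega) j]
    have hR : ((List.range sent.length).map (pvOut sent))[j] = pvOut sent j := by
      simp
    rw [hR, pvOut]
    refine if_congr ?_ rfl rfl
    constructor
    · rintro ⟨hj1, hm, hC⟩
      rw [List.mem_range] at hm
      exact ⟨hj1, by simp only [pvMatch, Bool.and_eq_true, decide_eq_true_eq]; exact ⟨by omega, hC⟩⟩
    · rintro ⟨hj1, hm⟩
      simp only [pvMatch, Bool.and_eq_true, decide_eq_true_eq] at hm
      exact ⟨hj1, by rw [List.mem_range]; omega, hm.2⟩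

theorem pvStepA_skip (sent : List (String × String)) (xs : List (String × String)) (n i : Nat) :
    pvStepA sent (xs, n + 1) i = (xs, n) := by
  unfold pvStepA; simp

theorem A_run (sent : List (String × String)) :
    ∀ (k i : Nat) (acc : List (String × String)), i + k = sent.length →
      (i = 0 ∨ pvMatch sent (i-1) = false) →
      ((List.range' i k).foldl (pvStepA sent) (acc, 0)).1
        = acc ++ (List.range' i k).map (pvOut sent) := by
  intro k
  induction k using Nat.strong_induction_on with
  | _ k IH =>
    intro i acc hk h0
    have hprev : ¬ (1 ≤ i ∧ pvMatch sent (i-1) = true) := by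
      rcases h0 with rfl | h
      · omega
      · rintro ⟨-, hx⟩; rw [h] at hx; cases hx
    have houti : pvOut sent i = sent.getD i ("", "") := by rw [pvOut, if_neg hprev]
    rcases k with _ | k'
    · simp [List.range']
    · rw [List.range'_succ, List.foldl_cons]
      by_cases hb : sent.length ≤ i + 3
      · have hstep : pvStepA sent (acc, 0) i = (acc ++ [sent.getD i ("", "")], 0) := by
          unfold pvStepA; simp [hb]
        have hmF : pvMatch sent i = false := by
          simp only [pvMatch, Bool.and_eq_false_iff, decide_eq_false_iff_not]
          left; omega
        rw [hstep, IH k' (by omega) (i+1) _ (by omega) (Or.inr hmF), List.map_cons]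
        simp [houti]
      · rw [not_le] at hb
        by_cases hc : pvCond sent i = true
        · have hM : pvMatch sent i = true := by
            simp only [pvMatch, Bool.and_eq_true, decide_eq_true_eq]; exact ⟨hb, hc⟩
          obtain ⟨hn1, hn2, hn3⟩ := pvMatch_no_overlap sent i hM
          have hstep : pvStepA sent (acc, 0) i
              = (acc ++ [sent.getD i ("", "")] ++ [((sent.getD (i+1) ("", "")).1, "N")]
                  ++ [sent.getD (i+2) ("", "")] ++ [sent.getD (i+3) ("", "")], 3) := by
            unfold pvStepA; simp [hc, show ¬ (sent.length ≤ i + 3) by omega]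
          rw [hstep]
          obtain ⟨k4, rfl⟩ : ∃ m, k' = m + 3 := ⟨k' - 3, by omega⟩
          rw [List.range'_succ, List.foldl_cons, pvStepA_skip,
            List.range'_succ, List.foldl_cons, pvStepA_skip,
            List.range'_succ, List.foldl_cons, pvStepA_skip,
            IH k4 (by omega) (i+4) _ (by omega) (Or.inr hn3)]
          have h1 : pvOut sent (i+1) = ((sent.getD (i+1) ("", "")).1, "N") := by
            rw [pvOut, if_pos ⟨by omega, hM⟩]
          have h2 : pvOut sent (i+2) = sent.getD (i+2) ("", "") := by
            rw [pvOut, if_neg]; rintro ⟨-, hx⟩; rw [show i+2-1 = i+1 by omega, hn1] at hx; cases hx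
          have h3 : pvOut sent (i+3) = sent.getD (i+3) ("", "") := by
            rw [pvOut, if_neg]; rintro ⟨-, hx⟩; rw [show i+3-1 = i+2 by omega, hn2] at hx; cases hx
          rw [List.map_cons, List.map_cons, List.map_cons, List.map_cons,
            houti, h1, h2, h3]
          simp
        · have hmF : pvMatch sent i = false := by
            simp only [pvMatch, Bool.and_eq_false_iff]
            right; exact (Bool.not_eq_true _).mp hc
          have hstep : pvStepA sent (acc, 0) i = (acc ++ [sent.getD i ("", "")], 0) := by
            unfold pvStepA; simp [show ¬ (sent.length ≤ i + 3) by omega, hc]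
          rw [hstep, IH k' (by omega) (i+1) _ (by omega) (Or.inr hmF), List.map_cons]
          simp [houti]

theorem A_eq_map (sent : List (String × String)) :
    DT_UNK_PUNC_N_Tagger sent = (List.range sent.length).map (pvOut sent) := by
  rw [pvA_def, List.range_eq_range']
  simpa using A_run sent sent.length 0 [] (by omega) (Or.inl rfl)

-- ===== VERDICT (by name: the statement is the Claim_ definition above) =====
theorem DT_UNK_PUNC_N_Tagger_spec : Claim_equal_DT_UNK_PUNC_N_Tagger := by
  intro sent _
  unfold Spec_DT_UNK_PUNC_N_Tagger
  rw [A_eq_map, B_eq_map]
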